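-- pv_equiv track=rewrite | github.com/UESTCfilter/Multi_agents_storage_test_system | backend/agents/coordinator.py | _determine_dependencies
-- ===== SOURCE A (Python) =====
-- from typing import Dict, List, Any, Optional, Tuple
--
-- def _determine_dependencies(agent_names: List[str], device_type: str) -> List[List[str]]:
--     """确定 Agent 执行依赖关系，返回分层列表"""
--     # 定义层级
--     layers = {
--         "physical": ["NAND Stack Expert", "PCM Media Expert", "Physical Layer Expert"],
--         "controller": ["FTL Expert", "Firmware Testing Expert", "NVMe Expert"],
--         "protocol": ["CXL Protocol Expert", "CXL Expert", "Type2 Device Expert", "Type3 Device Expert"],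
--         "system": ["CXL Switch Expert", "CXL Coherency Expert", "Data Integrity Expert"],
--         "application": ["QoS Expert", "Workload Expert", "Performance Expert", "Security Expert"],
--     }
--
--     # 按层级分组
--     execution_layers = []
--     for layer_name, layer_agents in layers.items():
--         layer = [a for a in agent_names if a in layer_agents]
--         if layer:
--             execution_layers.append(layer)
--
--     # 未分层的放最后并行执行
--     remaining = [a for a in agent_names if not any(a in layer for layer in execution_layers)]
--     if remaining:
--         execution_layers.append(remaining)
--
--     return execution_layers
-- ===== SOURCE B (Python) =====
-- from typing import List, Optional
--
-- _LAYER_ORDER = [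
--     ["NAND Stack Expert", "PCM Media Expert", "Physical Layer Expert"],
--     ["FTL Expert", "Firmware Testing Expert", "NVMe Expert"],
--     ["CXL Protocol Expert", "CXL Expert", "Type2 Device Expert", "Type3 Device Expert"],
--     ["CXL Switch Expert", "CXL Coherency Expert", "Data Integrity Expert"],
--     ["QoS Expert", "Workload Expert", "Performance Expert", "Security Expert"],
-- ]
--
-- def _layer_of(name: str) -> Optional[int]:
--     for i, names in enumerate(_LAYER_ORDER):
--         if name in names:
--             return i
--     return None
--
-- def _determine_dependencies(agent_names: List[str], device_type: str) -> List[List[str]]: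
--     buckets = [[] for _ in _LAYER_ORDER]
--     remaining = []
--     for a in agent_names:
--         i = _layer_of(a)
--         if i is None:
--             remaining.append(a)
--         else:
--             buckets[i].append(a)
--     result = [b for b in buckets if b]
--     if remaining:
--         result.append(remaining)
--     return result
-- ===== Notes on version B (the rewrite author's own statement) =====
-- stated objective: alternative
-- what changed: Replaces A's five per-layer filtering scans over agent_names plus a nested any(...) membership scan for the remainder with a single bucketing pass that assigns each name a layer index via a lookup helper and emits the nonempty buckets in layer order, remainder last.
import Mathlib
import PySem

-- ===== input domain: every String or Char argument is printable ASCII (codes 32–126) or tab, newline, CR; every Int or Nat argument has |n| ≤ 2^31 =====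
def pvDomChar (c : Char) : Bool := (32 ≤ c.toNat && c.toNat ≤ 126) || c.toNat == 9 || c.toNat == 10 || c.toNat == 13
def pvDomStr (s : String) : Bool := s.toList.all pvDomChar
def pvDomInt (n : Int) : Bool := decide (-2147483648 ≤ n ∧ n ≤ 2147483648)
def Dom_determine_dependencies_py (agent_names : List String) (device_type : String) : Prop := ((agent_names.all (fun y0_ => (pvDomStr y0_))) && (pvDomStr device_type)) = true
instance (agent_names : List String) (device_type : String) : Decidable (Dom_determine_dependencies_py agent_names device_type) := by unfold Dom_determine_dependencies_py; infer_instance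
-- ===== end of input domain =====

-- B replaces A's five per-layer filtering scans plus a nested any(...) remaining check
-- with a single bucketing pass over agent_names keyed by a layer-index lookup (objective: alternative decomposition, same cost).


-- ===== PORT A =====
-- the `layers` dict literal, in insertion order
def pvLayersA : List (String × List String) :=
  [("physical", ["NAND Stack Expert", "PCM Media Expert", "Physical Layer Expert"]),
   ("controller", ["FTL Expert", "Firmware Testing Expert", "NVMe Expert"]),
   ("protocol", ["CXL Protocol Expert", "CXL Expert", "Type2 Device Expert", "Type3 Device Expert"]),
   ("system", ["CXL Switch Expert", "CXL Coherency Expert", "Data Integrity Expert"]),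
   ("application", ["QoS Expert", "Workload Expert", "Performance Expert", "Security Expert"])]

-- the body of A's `for layer_name, layer_agents in layers.items()` loop
def pvStepA (agent_names : List String) (acc : List (List String)) (p : String × List String) : List (List String) :=
  if (agent_names.filter (fun a => p.2.contains a)).isEmpty then acc
  else acc ++ [agent_names.filter (fun a => p.2.contains a)]

def determine_dependencies_py (agent_names : List String) (device_type : String) : List (List String) :=
  let execution_layers := pvLayersA.foldl (pvStepA agent_names) []
  let remaining := agent_names.filter (fun a => !(execution_layers.any (fun layer => layer.contains a)))
  if remaining.isEmpty then execution_layers else execution_layers ++ [remaining]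

-- ===== PORT B =====
def pvL0 : List String := ["NAND Stack Expert", "PCM Media Expert", "Physical Layer Expert"]
def pvL1 : List String := ["FTL Expert", "Firmware Testing Expert", "NVMe Expert"]
def pvL2 : List String := ["CXL Protocol Expert", "CXL Expert", "Type2 Device Expert", "Type3 Device Expert"]
def pvL3 : List String := ["CXL Switch Expert", "CXL Coherency Expert", "Data Integrity Expert"]
def pvL4 : List String := ["QoS Expert", "Workload Expert", "Performance Expert", "Security Expert"]

def pvOrderB : List (List String) := [pvL0, pvL1, pvL2, pvL3, pvL4]

-- Source B's `_layer_of`: linear scan with index over _LAYER_ORDER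
def pvLayerOfGo (i : Nat) (rest : List (List String)) (name : String) : Option Nat :=
  match rest with
  | [] => none
  | ns :: rest' => if ns.contains name then some i else pvLayerOfGo (i + 1) rest' name

def pvLayerOf (name : String) : Option Nat := pvLayerOfGo 0 pvOrderB name

-- the body of B's single pass: state = (buckets, remaining)
def pvStepB (st : List (List String) × List String) (a : String) : List (List String) × List String :=
  match pvLayerOf a with
  | none => (st.1, st.2 ++ [a])
  | some i => (st.1.set i ((st.1.getD i []) ++ [a]), st.2)

def determine_dependencies_py_alt (agent_names : List String) (device_type : String) : List (List String) :=
  let st := agent_names.foldl pvStepB ([[], [], [], [], []], [])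
  let result := st.1.filter (fun b => !b.isEmpty)
  if st.2.isEmpty then result else result ++ [st.2]

-- ===== PRECONDITION & SPEC =====
def Spec_determine_dependencies_py (agent_names : List String) (device_type : String) (out : List (List String)) : Prop := out = determine_dependencies_py_alt agent_names device_type
instance (agent_names : List String) (device_type : String) (out : List (List String)) : Decidable (Spec_determine_dependencies_py agent_names device_type out) := by unfold Spec_determine_dependencies_py; infer_instance

-- ===== CLAIM (what is proved, stated in full; the proofs are below) =====
def Claim_equal_determine_dependencies_py : Prop := ∀ (agent_names : List String) (device_type : String), Dom_determine_dependencies_py agent_names device_type → Spec_determine_dependencies_py agent_names device_type (determine_dependencies_py agent_names device_type)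

-- ===== LEMMAS AND PROOFS =====

set_option maxHeartbeats 1000000

lemma layerOf_char (a : String) :
    pvLayerOf a =
      if a ∈ pvL0 then some 0 else if a ∈ pvL1 then some 1
      else if a ∈ pvL2 then some 2 else if a ∈ pvL3 then some 3
      else if a ∈ pvL4 then some 4 else none := by
  simp [pvLayerOf, pvOrderB, pvLayerOfGo]

-- disjointness of the literal layer lists
lemma disj1 {a : String} (h : a ∈ pvL1) : a ∉ pvL0 := by
  simp [pvL1] at h; rcases h with h | h | h <;> subst h <;> decide
lemma disj2 {a : String} (h : a ∈ pvL2) : a ∉ pvL0 ∧ a ∉ pvL1 := by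
  simp [pvL2] at h; rcases h with h | h | h | h <;> subst h <;> decide
lemma disj3 {a : String} (h : a ∈ pvL3) : a ∉ pvL0 ∧ a ∉ pvL1 ∧ a ∉ pvL2 := by
  simp [pvL3] at h; rcases h with h | h | h <;> subst h <;> decide
lemma disj4 {a : String} (h : a ∈ pvL4) : a ∉ pvL0 ∧ a ∉ pvL1 ∧ a ∉ pvL2 ∧ a ∉ pvL3 := by
  simp [pvL4] at h; rcases h with h | h | h | h <;> subst h <;> decide

lemma q_eq_p0 (a : String) : (pvLayerOf a == some 0) = pvL0.contains a := by
  rw [layerOf_char]; split_ifs <;> simp_all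
lemma q_eq_p1 (a : String) : (pvLayerOf a == some 1) = pvL1.contains a := by
  rw [layerOf_char]; by_cases h : a ∈ pvL1
  · simp [disj1 h, h]
  · split_ifs <;> simp_all
lemma q_eq_p2 (a : String) : (pvLayerOf a == some 2) = pvL2.contains a := by
  rw [layerOf_char]; by_cases h : a ∈ pvL2
  · simp [(disj2 h).1, (disj2 h).2, h]
  · split_ifs <;> simp_all
lemma q_eq_p3 (a : String) : (pvLayerOf a == some 3) = pvL3.contains a := by
  rw [layerOf_char]; by_cases h : a ∈ pvL3
  · simp [(disj3 h).1, (disj3 h).2.1, (disj3 h).2.2, h]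
  · split_ifs <;> simp_all
lemma q_eq_p4 (a : String) : (pvLayerOf a == some 4) = pvL4.contains a := by
  rw [layerOf_char]; by_cases h : a ∈ pvL4
  · simp [(disj4 h).1, (disj4 h).2.1, (disj4 h).2.2.1, (disj4 h).2.2.2, h]
  · split_ifs <;> simp_all

lemma layerOf_lt {a : String} {i : Nat} (h : pvLayerOf a = some i) : i < 5 := by
  rw [layerOf_char] at h; split_ifs at h <;> simp_all <;> omega

-- invariant of B's single pass
lemma foldB (xs : List String) : ∀ b0 b1 b2 b3 b4 rem,
    xs.foldl pvStepB ([b0, b1, b2, b3, b4], rem) =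
      ([b0 ++ xs.filter (fun a => pvLayerOf a == some 0),
        b1 ++ xs.filter (fun a => pvLayerOf a == some 1),
        b2 ++ xs.filter (fun a => pvLayerOf a == some 2),
        b3 ++ xs.filter (fun a => pvLayerOf a == some 3),
        b4 ++ xs.filter (fun a => pvLayerOf a == some 4)],
       rem ++ xs.filter (fun a => pvLayerOf a == none)) := by
  induction xs with
  | nil => intro b0 b1 b2 b3 b4 rem; simp
  | cons a xs ih =>
    intro b0 b1 b2 b3 b4 rem
    rw [List.foldl_cons]
    rcases h : pvLayerOf a with _ | i
    · simp [pvStepB, h, ih, List.append_assoc]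
    · have hi := layerOf_lt h
      interval_cases i <;>
        simp [pvStepB, h, ih, List.append_assoc, List.set, List.getD]

lemma contains_filter {a : String} {xs : List String} (ha : a ∈ xs) (p : String → Bool) :
    (xs.filter p).contains a = p a := by
  rcases hp : p a with _ | _
  · simp [List.mem_filter, hp]
  · simp [List.mem_filter, ha, hp]

-- one layer-step of A, seen through membership of a fixed a ∈ xs
lemma any_stepA {a : String} {xs : List String} (ha : a ∈ xs) (acc : List (List String))
    (p : String × List String) :
    ((pvStepA xs acc p).any (fun layer => layer.contains a)) =
      (acc.any (fun layer => layer.contains a) || p.2.contains a) := by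
  unfold pvStepA
  have hc := contains_filter ha (fun b => p.2.contains b)
  split_ifs with h
  · rw [List.isEmpty_iff] at h
    rw [h] at hc
    simp at hc
    simp [hc]
  · simp [ha]

-- A's execution_layers, membership of an element of agent_names
lemma execA_any {a : String} {xs : List String} (ha : a ∈ xs) :
    ((pvLayersA.foldl (pvStepA xs) []).any (fun layer => layer.contains a)) =
      (pvL0.contains a || pvL1.contains a || pvL2.contains a || pvL3.contains a || pvL4.contains a) := by
  simp only [pvLayersA, List.foldl_cons, List.foldl_nil, any_stepA ha]
  simp [pvL0, pvL1, pvL2, pvL3, pvL4, pvLayersA, Bool.or_assoc]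

lemma remaining_eq (xs : List String) :
    xs.filter (fun a => !((pvLayersA.foldl (pvStepA xs) []).any (fun layer => layer.contains a))) =
      xs.filter (fun a => pvLayerOf a == none) := by
  apply List.filter_congr
  intro a ha
  rw [execA_any ha, layerOf_char]
  by_cases h0 : a ∈ pvL0 <;> by_cases h1 : a ∈ pvL1 <;>
    by_cases h2 : a ∈ pvL2 <;> by_cases h3 : a ∈ pvL3 <;>
      by_cases h4 : a ∈ pvL4 <;> simp [h0, h1, h2, h3, h4]

lemma layersA_eq : pvLayersA =
    [("physical", pvL0), ("controller", pvL1), ("protocol", pvL2),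
     ("system", pvL3), ("application", pvL4)] := rfl

lemma exec_eq_buckets (xs : List String) :
    pvLayersA.foldl (pvStepA xs) [] =
      ([xs.filter (fun a => pvL0.contains a), xs.filter (fun a => pvL1.contains a),
        xs.filter (fun a => pvL2.contains a), xs.filter (fun a => pvL3.contains a),
        xs.filter (fun a => pvL4.contains a)].filter (fun b => !b.isEmpty)) := by
  rw [layersA_eq]
  simp only [List.foldl_cons, List.foldl_nil, pvStepA, List.filter_cons, List.filter_nil]
  generalize xs.filter (fun a => pvL0.contains a) = F0
  generalize xs.filter (fun a => pvL1.contains a) = F1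
  generalize xs.filter (fun a => pvL2.contains a) = F2
  generalize xs.filter (fun a => pvL3.contains a) = F3
  generalize xs.filter (fun a => pvL4.contains a) = F4
  by_cases e0 : F0.isEmpty = true <;> by_cases e1 : F1.isEmpty = true <;>
    by_cases e2 : F2.isEmpty = true <;> by_cases e3 : F3.isEmpty = true <;>
      by_cases e4 : F4.isEmpty = true <;> simp [e0, e1, e2, e3, e4]

-- ===== VERDICT (by name: the statement is the Claim_ definition above) =====
theorem determine_dependencies_py_spec : Claim_equal_determine_dependencies_py := by
  intro agent_names device_type _
  show determine_dependencies_py agent_names device_type = determine_dependencies_py_alt agent_names device_type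
  simp only [determine_dependencies_py, determine_dependencies_py_alt]
  rw [foldB]
  simp only [List.nil_append]
  have e0 : (fun a => pvLayerOf a == some 0) = (fun a => pvL0.contains a) := funext q_eq_p0
  have e1 : (fun a => pvLayerOf a == some 1) = (fun a => pvL1.contains a) := funext q_eq_p1
  have e2 : (fun a => pvLayerOf a == some 2) = (fun a => pvL2.contains a) := funext q_eq_p2
  have e3 : (fun a => pvLayerOf a == some 3) = (fun a => pvL3.contains a) := funext q_eq_p3
  have e4 : (fun a => pvLayerOf a == some 4) = (fun a => pvL4.contains a) := funext q_eq_p4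
  rw [e0, e1, e2, e3, e4, remaining_eq, exec_eq_buckets]
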